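-- pv_equiv track=rewrite | github.com/mwintersperger-tgm/prototype | importPkg/util.py | fetchtnameforfile
-- ===== SOURCE A (Python) =====
-- def fetchtnameforfile(filename):
--     """
--     takes a filename and extracts the part between CC and file ending
--     :param filename:
--     :return:
--     """
--     lastnumindex = -1
--     for i in range(0, len(filename)):
--         char = ord(list(filename)[i])
--         if char >= ord('0') and char <= ord('9'):
--             lastnumindex = i
--     if lastnumindex >= 0 and filename.index('.') >= 0:
--         return filename[lastnumindex + 1:filename.index('.')]
-- ===== SOURCE B (Python) =====
-- def fetchtnameforfile(filename):
--     """
--     takes a filename and extracts the part between CC and file ending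
--     Reverse scan: find the last digit by walking from the end with early exit.
--     """
--     for i in range(len(filename) - 1, -1, -1):
--         c = filename[i]
--         if c >= '0' and c <= '9':
--             return filename[i + 1:filename.index('.')]
--     return None
-- ===== Notes on version B (the rewrite author's own statement) =====
-- stated objective: faster
-- what changed: B finds the last digit by a reverse scan with early exit (first digit from the end) instead of A's full forward pass that rebuilds list(filename) on every iteration while overwriting lastnumindex.
import Mathlib
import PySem

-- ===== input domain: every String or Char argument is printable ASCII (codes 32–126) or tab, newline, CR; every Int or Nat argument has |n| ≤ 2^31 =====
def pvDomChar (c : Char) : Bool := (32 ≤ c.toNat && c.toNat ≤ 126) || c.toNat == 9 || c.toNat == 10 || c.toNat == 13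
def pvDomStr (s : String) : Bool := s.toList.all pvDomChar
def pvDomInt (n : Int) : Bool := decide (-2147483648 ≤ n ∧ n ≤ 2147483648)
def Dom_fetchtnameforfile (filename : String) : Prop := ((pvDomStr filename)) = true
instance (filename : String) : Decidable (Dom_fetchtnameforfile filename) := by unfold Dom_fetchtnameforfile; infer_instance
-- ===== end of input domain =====

-- B replaces A's full forward scan (which rebuilds list(filename) each step and overwrites
-- lastnumindex) with a reverse scan that stops at the first digit from the end; return values agree.

-- ===== PORT A =====
def fetchtnameforfile (filename : String) : Option String :=
  let cs := filename.toList
  let lastnumindex : Int :=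
    (PySem.List.pyRange 0 (cs.length : Int) 1).foldl
      (fun acc i =>
        let ch := (PySem.List.pyGetD cs i ' ').toNat
        if 48 ≤ ch ∧ ch ≤ 57 then i else acc)
      (-1)
  if 0 ≤ lastnumindex then
    let dot := PySem.Str.find filename "."
    if 0 ≤ dot then
      some (PySem.Str.slice filename (some (lastnumindex + 1)) (some dot))
    else none   -- Python's filename.index('.') raises ValueError here; excluded by Pre_
  else none

-- ===== PORT B =====
def fetchAltGo (filename : String) (cs : List Char) : List Nat → Option String
  | [] => none
  | i :: rest =>
    let c := cs.getD i ' '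
    if '0' ≤ c ∧ c ≤ '9' then
      let dot := PySem.Str.find filename "."
      if 0 ≤ dot then
        some (PySem.Str.slice filename (some ((i : Int) + 1)) (some dot))
      else none   -- Python's filename.index('.') raises ValueError here; excluded by Pre_
    else fetchAltGo filename cs rest

def fetchtnameforfile_alt (filename : String) : Option String :=
  let cs := filename.toList
  fetchAltGo filename cs (List.range cs.length).reverse

-- ===== PRECONDITION & SPEC =====
-- Pre_ excludes exactly the inputs where Python A raises ValueError (a digit present but no '.');
-- B raises the same ValueError there, so nothing A returns on is excluded.
def Pre_fetchtnameforfile (filename : String) : Prop :=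
  (filename.toList.any fun c => decide ('0' ≤ c ∧ c ≤ '9')) = true →
    PySem.Str.isIn "." filename = true
instance (filename : String) : Decidable (Pre_fetchtnameforfile filename) := by
  unfold Pre_fetchtnameforfile; infer_instance
def pvWitness_fetchtnameforfile : String := "CC12name.txt"

def Spec_fetchtnameforfile (filename : String) (out : Option String) : Prop := out = fetchtnameforfile_alt filename
instance (filename : String) (out : Option String) : Decidable (Spec_fetchtnameforfile filename out) := by unfold Spec_fetchtnameforfile; infer_instance

-- ===== CLAIM (what is proved, stated in full; the proofs are below) =====
def Claim_equal_fetchtnameforfile : Prop := ∀ (filename : String), Dom_fetchtnameforfile filename → Pre_fetchtnameforfile filename → Spec_fetchtnameforfile filename (fetchtnameforfile filename)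

-- ===== LEMMAS AND PROOFS =====

-- A's ord-based digit test agrees with B's character-comparison digit test.
theorem digit_cond_iff (c : Char) :
    (48 ≤ c.toNat ∧ c.toNat ≤ 57) = ('0' ≤ c ∧ c ≤ '9') := by
  have h0 : ('0' ≤ c) ↔ (48 ≤ c.toNat) := by
    rw [Char.le_def, UInt32.le_iff_toNat_le]; rfl
  have h9 : (c ≤ '9') ↔ (c.toNat ≤ 57) := by
    rw [Char.le_def, UInt32.le_iff_toNat_le]; rfl
  rw [h0, h9]

-- A's forward last-wins fold over range(0, n) computes the first digit index of range(n) reversed.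
theorem loop_eq (cs : List Char) (n : Nat) :
    (PySem.List.pyRange 0 (n : Int) 1).foldl
      (fun acc i =>
        let ch := (PySem.List.pyGetD cs i ' ').toNat
        if 48 ≤ ch ∧ ch ≤ 57 then i else acc)
      (-1)
    = match (List.range n).reverse.find?
        (fun i => decide ('0' ≤ cs.getD i ' ' ∧ cs.getD i ' ' ≤ '9')) with
      | some i => (i : Int)
      | none => -1 := by
  induction n with
  | zero => simp [PySem.List.pyRange_one_eq_nil]
  | succ n ih =>
    have hc : ((n + 1 : Nat) : Int) = (n : Int) + 1 := by push_cast; ring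
    rw [hc, PySem.List.pyRange_one_succ_right (by positivity), List.foldl_append,
      List.range_succ, List.reverse_append, ih]
    simp only [List.reverse_singleton, List.singleton_append, List.find?_cons, List.foldl_cons,
      List.foldl_nil, PySem.List.pyGetD_natCast, digit_cond_iff]
    by_cases h : ('0' ≤ cs.getD n ' ' ∧ cs.getD n ' ' ≤ '9')
    all_goals simp only [List.getD_eq_getElem?_getD] at h
    · simp [h]
    · simp [h]

-- B's recursion is find?-then-finish over its index list.
theorem altGo_eq (filename : String) (cs : List Char) (idxs : List Nat) :
    fetchAltGo filename cs idxs
    = match idxs.find? (fun i => decide ('0' ≤ cs.getD i ' ' ∧ cs.getD i ' ' ≤ '9')) with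
      | some i =>
          if 0 ≤ PySem.Str.find filename "." then
            some (PySem.Str.slice filename (some ((i : Int) + 1))
              (some (PySem.Str.find filename ".")))
          else none
      | none => none := by
  induction idxs with
  | nil => rfl
  | cons i rest ih =>
    by_cases h : ('0' ≤ cs.getD i ' ' ∧ cs.getD i ' ' ≤ '9')
    all_goals simp only [List.getD_eq_getElem?_getD] at h
    · simp [fetchAltGo, h]
    · simp [fetchAltGo, h, ih]

-- ===== VERDICT (by name: the statement is the Claim_ definition above) =====
theorem fetchtnameforfile_spec : Claim_equal_fetchtnameforfile := by
  intro filename _ _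
  show fetchtnameforfile filename = fetchtnameforfile_alt filename
  simp only [fetchtnameforfile, fetchtnameforfile_alt]
  rw [loop_eq, altGo_eq]
  cases hf : (List.range filename.toList.length).reverse.find?
      (fun i => decide ('0' ≤ filename.toList.getD i ' ' ∧ filename.toList.getD i ' ' ≤ '9')) with
  | none => simp
  | some i => simp
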